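-- pv_equiv track=rewrite | github.com/uzunandrew/PDF-proverka | webapp/services/usage_service.py | _dedup_for_duration
-- ===== SOURCE A (Python) =====
-- def _dedup_for_duration(records: list[dict]) -> list[dict]:
--     """
--     Дедупликация записей по original stage для подсчёта duration.
--     При retry одного batch (block_batch_019) записывается несколько records.
--     Для duration оставляем только последнюю запись per original stage.
--     """
--     by_stage: dict[str, dict] = {}
--     for r in records:
--         orig_stage = r.get("stage", "?")
--         existing = by_stage.get(orig_stage)
--         if existing is None or r.get("timestamp", "") > existing.get("timestamp", ""):
--             by_stage[orig_stage] = r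
--     return list(by_stage.values())
-- ===== SOURCE B (Python) =====
-- def _dedup_for_duration(records: list[dict]) -> list[dict]:
--     """Group records by original stage, then keep the max-timestamp record of
--     each group (max returns the first record attaining the maximum, matching
--     the strict-'>' running update's tie-breaking)."""
--     groups: dict[str, list[dict]] = {}
--     for r in records:
--         groups.setdefault(r.get("stage", "?"), []).append(r)
--     return [max(g, key=lambda r: r.get("timestamp", "")) for g in groups.values()]
-- ===== Notes on version B (the rewrite author's own statement) =====
-- stated objective: alternative
-- what changed: Replaces A's single running-max fold (one dict holding the current best record per stage) by a two-pass group-then-reduce: first build an ordered dict of all records per stage, then take max(group, key=timestamp) for each group.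
import Mathlib
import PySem

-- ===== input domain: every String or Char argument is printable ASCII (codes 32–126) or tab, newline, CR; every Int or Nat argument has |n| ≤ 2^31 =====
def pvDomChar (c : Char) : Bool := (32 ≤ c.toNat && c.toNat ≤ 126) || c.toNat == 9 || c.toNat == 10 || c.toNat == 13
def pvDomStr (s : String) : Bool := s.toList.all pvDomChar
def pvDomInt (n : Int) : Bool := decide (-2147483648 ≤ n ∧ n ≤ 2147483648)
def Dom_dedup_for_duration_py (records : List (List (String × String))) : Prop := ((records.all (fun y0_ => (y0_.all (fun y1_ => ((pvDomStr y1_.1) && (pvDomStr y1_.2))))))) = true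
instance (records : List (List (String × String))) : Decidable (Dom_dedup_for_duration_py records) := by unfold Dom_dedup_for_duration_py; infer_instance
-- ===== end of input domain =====

-- B replaces A's single running-max fold by a group-by-stage pass followed by a max-per-group
-- reduction (objective: alternative decomposition, same cost).

-- ===== PORT A =====
def dedup_for_duration_py (records : List (List (String × String))) : List (List (String × String)) :=
  let by_stage : PySem.Dict String (List (String × String)) :=
    records.foldl (fun by_stage r =>
      let orig_stage := (PySem.Dict.mk r).getD "stage" "?"
      match by_stage.get? orig_stage with
      | none => by_stage.insert orig_stage r
      | some existing =>
        if (PySem.Dict.mk existing).getD "timestamp" "" < (PySem.Dict.mk r).getD "timestamp" ""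
        then by_stage.insert orig_stage r
        else by_stage) PySem.Dict.empty
  by_stage.values

-- ===== PORT B =====
-- groups.setdefault(k, []).append(r) is exactly modify k [] (· ++ [r]); every group is nonempty,
-- so Python's max(g, key=…) never raises and filterMap over PySem.List.max? keeps every group.
def dedup_for_duration_py_alt (records : List (List (String × String))) : List (List (String × String)) :=
  let groups : PySem.Dict String (List (List (String × String))) :=
    records.foldl (fun groups r =>
      groups.modify ((PySem.Dict.mk r).getD "stage" "?") [] (fun g => g ++ [r])) PySem.Dict.empty
  groups.values.filterMap (fun g => PySem.List.max? g (fun r => (PySem.Dict.mk r).getD "timestamp" ""))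

-- ===== PRECONDITION & SPEC =====
def Spec_dedup_for_duration_py (records : List (List (String × String))) (out : List (List (String × String))) : Prop := out = dedup_for_duration_py_alt records
instance (records : List (List (String × String))) (out : List (List (String × String))) : Decidable (Spec_dedup_for_duration_py records out) := by unfold Spec_dedup_for_duration_py; infer_instance

-- ===== CLAIM (what is proved, stated in full; the proofs are below) =====
def Claim_equal_dedup_for_duration_py : Prop := ∀ (records : List (List (String × String))), Dom_dedup_for_duration_py records → Spec_dedup_for_duration_py records (dedup_for_duration_py records)

-- ===== LEMMAS AND PROOFS =====

-- the two key extractors used by both Pythons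
def pvKey (r : List (String × String)) : String := (PySem.Dict.mk r).getD "timestamp" ""
def pvStg (r : List (String × String)) : String := (PySem.Dict.mk r).getD "stage" "?"

-- A's loop body, on the underlying items list
def pvStepA (r : List (String × String)) (L : List (String × List (String × String))) :
    List (String × List (String × String)) :=
  match L.find? (fun p => p.1 == pvStg r) with
  | none => L ++ [(pvStg r, r)]
  | some p =>
    if pvKey p.2 < pvKey r then L.map (fun q => if q.1 == pvStg r then (pvStg r, r) else q) else L

-- B's grouping loop body, on the underlying items list
def pvStepB (r : List (String × String)) (G : List (String × List (List (String × String)))) :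
    List (String × List (List (String × String))) :=
  match G.find? (fun p => p.1 == pvStg r) with
  | none => G ++ [(pvStg r, [r])]
  | some q => G.map (fun p => if p.1 == pvStg r then (pvStg r, q.2 ++ [r]) else p)

-- invariant relating A's entry for a stage to B's group for that stage
def pvRel (a : String × List (String × String)) (p : String × List (List (String × String))) : Prop :=
  a.1 = p.1 ∧ PySem.List.max? p.2 pvKey = some a.2

lemma pv_bodyA_eq (d : PySem.Dict String (List (String × String))) (r : List (String × String)) :
    (match d.get? ((PySem.Dict.mk r).getD "stage" "?") with
     | none => d.insert ((PySem.Dict.mk r).getD "stage" "?") r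
     | some existing =>
       if (PySem.Dict.mk existing).getD "timestamp" "" < (PySem.Dict.mk r).getD "timestamp" ""
       then d.insert ((PySem.Dict.mk r).getD "stage" "?") r
       else d) = PySem.Dict.mk (pvStepA r d.items) := by
  simp only [show (PySem.Dict.mk r).getD "stage" "?" = pvStg r from rfl,
    show ∀ x : List (String × String), (PySem.Dict.mk x).getD "timestamp" "" = pvKey x from
      fun _ => rfl]
  unfold pvStepA
  cases hf : List.find? (fun p => p.1 == pvStg r) d.items with
  | none =>
    have hg : d.get? (pvStg r) = none := by simp [PySem.Dict.get?, hf]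
    have hc : d.contains (pvStg r) = false := by
      simp only [PySem.Dict.contains, List.any_eq_false]
      intro q hq
      simpa using List.find?_eq_none.mp hf q hq
    rw [hg]
    simp [PySem.Dict.insert, hc]
  | some p =>
    have hg : d.get? (pvStg r) = some p.2 := by simp [PySem.Dict.get?, hf]
    have hc : d.contains (pvStg r) = true := by
      simp only [PySem.Dict.contains, List.any_eq_true]
      exact ⟨p, List.mem_of_find?_eq_some hf, by simpa using List.find?_some hf⟩
    rw [hg]
    by_cases hlt : pvKey p.2 < pvKey r
    · simp [hlt, PySem.Dict.insert, hc]
    · simp [hlt]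

lemma pv_bodyB_eq (g : PySem.Dict String (List (List (String × String)))) (r : List (String × String)) :
    g.modify ((PySem.Dict.mk r).getD "stage" "?") [] (fun l => l ++ [r]) =
      PySem.Dict.mk (pvStepB r g.items) := by
  simp only [show (PySem.Dict.mk r).getD "stage" "?" = pvStg r from rfl]
  unfold pvStepB PySem.Dict.modify
  cases hf : List.find? (fun p => p.1 == pvStg r) g.items with
  | none =>
    have hg : g.getD (pvStg r) [] = [] := by simp [PySem.Dict.getD, PySem.Dict.get?, hf]
    have hc : g.contains (pvStg r) = false := by
      simp only [PySem.Dict.contains, List.any_eq_false]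
      intro q hq
      simpa using List.find?_eq_none.mp hf q hq
    simp [hg, PySem.Dict.insert, hc]
  | some q =>
    have hg : g.getD (pvStg r) [] = q.2 := by simp [PySem.Dict.getD, PySem.Dict.get?, hf]
    have hc : g.contains (pvStg r) = true := by
      simp only [PySem.Dict.contains, List.any_eq_true]
      exact ⟨q, List.mem_of_find?_eq_some hf, by simpa using List.find?_some hf⟩
    simp [hg, PySem.Dict.insert, hc]

lemma pv_keys_eq {L : List (String × List (String × String))}
    {G : List (String × List (List (String × String)))}
    (h : List.Forall₂ pvRel L G) : L.map Prod.fst = G.map Prod.fst := by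
  induction h with
  | nil => rfl
  | cons hr _ ih => simp [hr.1, ih]

lemma pv_max_append {g : List (List (String × String))} {m r : List (String × String)}
    (h : PySem.List.max? g pvKey = some m) :
    PySem.List.max? (g ++ [r]) pvKey =
      if pvKey m < pvKey r then some r else some m := by
  simp only [PySem.List.max?] at h ⊢
  rw [List.foldl_append, h]
  rfl

lemma pv_stepA_cons_ne (r a : _) (L : List (String × List (String × String)))
    (h : (a.1 == pvStg r) = false) : pvStepA r (a :: L) = a :: pvStepA r L := by
  unfold pvStepA
  rw [List.find?_cons_of_neg (by simp [h])]
  cases hf : List.find? (fun p => p.1 == pvStg r) L with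
  | none => simp
  | some q =>
    by_cases hlt : pvKey q.2 < pvKey r
    · simp only [if_pos hlt, List.map_cons, h, Bool.false_eq_true, if_false]
    · simp [hlt]

lemma pv_stepB_cons_ne (r : List (String × String)) (a : _)
    (G : List (String × List (List (String × String))))
    (h : (a.1 == pvStg r) = false) : pvStepB r (a :: G) = a :: pvStepB r G := by
  unfold pvStepB
  rw [List.find?_cons_of_neg (by simp [h])]
  cases hf : List.find? (fun p => p.1 == pvStg r) G with
  | none => simp
  | some q => simp only [List.map_cons, h, Bool.false_eq_true, if_false]

lemma pv_rel_step (r : List (String × String))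
    {L : List (String × List (String × String))}
    {G : List (String × List (List (String × String)))}
    (h : List.Forall₂ pvRel L G) (hnd : (L.map Prod.fst).Nodup) :
    List.Forall₂ pvRel (pvStepA r L) (pvStepB r G) := by
  induction h with
  | nil => exact List.Forall₂.cons ⟨rfl, rfl⟩ List.Forall₂.nil
  | cons hr hF ih =>
    rename_i a p L G
    by_cases hs : a.1 = pvStg r
    · have hpA : (a.1 == pvStg r) = true := by simp [hs]
      have hpB : (p.1 == pvStg r) = true := by simp [← hr.1, hs]
      have haL : a.1 ∉ L.map Prod.fst := (List.nodup_cons.mp hnd).1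
      have hmapL : List.map (fun q => if q.1 == pvStg r then (pvStg r, r) else q) L = L := by
        calc List.map (fun q => if q.1 == pvStg r then (pvStg r, r) else q) L
            = List.map id L := by
              apply List.map_congr_left
              intro q hq
              have : q.1 ≠ pvStg r := by
                intro hq1
                exact haL (hs ▸ hq1 ▸ List.mem_map_of_mem hq)
              simp [this]
          _ = L := List.map_id L
      have haG : ∀ q ∈ G, q.1 ≠ pvStg r := by
        intro q hq hq1
        have : q.1 ∈ G.map Prod.fst := List.mem_map_of_mem hq
        rw [← pv_keys_eq hF] at this
        exact haL (hs ▸ hq1 ▸ this)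
      have hmapG : List.map (fun q => if q.1 == pvStg r then (pvStg r, p.2 ++ [r]) else q) G
          = G := by
        calc List.map (fun q => if q.1 == pvStg r then (pvStg r, p.2 ++ [r]) else q) G
            = List.map id G := by
              apply List.map_congr_left
              intro q hq
              simp [haG q hq]
          _ = G := List.map_id G
      unfold pvStepA pvStepB
      have hfa : List.find? (fun p : String × List (String × String) => p.1 == pvStg r)
          (a :: L) = some a := List.find?_cons_of_pos (by simpa using hpA)
      have hfp : List.find? (fun p : String × List (List (String × String)) => p.1 == pvStg r)
          (p :: G) = some p := List.find?_cons_of_pos (by simpa using hpB)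
      rw [hfa, hfp]
      dsimp only
      simp only [List.map_cons, hpA, hpB, if_true, hmapL, hmapG]
      by_cases hlt : pvKey a.2 < pvKey r
      · rw [if_pos hlt]
        exact List.Forall₂.cons ⟨rfl, by rw [pv_max_append hr.2, if_pos hlt]⟩ hF
      · rw [if_neg hlt]
        exact List.Forall₂.cons ⟨hs, by rw [pv_max_append hr.2, if_neg hlt]⟩ hF
    · have hpA : (a.1 == pvStg r) = false := by simp [hs]
      have hpB : (p.1 == pvStg r) = false := by simp [← hr.1, hs]
      rw [pv_stepA_cons_ne r a L hpA, pv_stepB_cons_ne r p G hpB]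
      exact List.Forall₂.cons hr (ih (List.nodup_cons.mp hnd).2)

lemma pv_nodup_stepA (r : List (String × String))
    {L : List (String × List (String × String))}
    (hnd : (L.map Prod.fst).Nodup) : ((pvStepA r L).map Prod.fst).Nodup := by
  unfold pvStepA
  cases hf : List.find? (fun p => p.1 == pvStg r) L with
  | none =>
    dsimp only
    rw [List.map_append, List.nodup_append]
    refine ⟨hnd, List.nodup_singleton _, ?_⟩
    intro x hx y hy
    have hy2 : y = pvStg r := by simpa using hy
    obtain ⟨q, hq, hq1⟩ := List.mem_map.mp hx
    intro hxy
    exact (List.find?_eq_none.mp hf q hq) (by simp [hq1, hxy, hy2])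
  | some p =>
    dsimp only
    by_cases hlt : pvKey p.2 < pvKey r
    · rw [if_pos hlt]
      have hkeys : (List.map (fun q => if q.1 == pvStg r then (pvStg r, r) else q) L).map Prod.fst
          = L.map Prod.fst := by
        rw [List.map_map]
        apply List.map_congr_left
        intro q hq
        by_cases h : (q.1 == pvStg r) = true
        · simp only [Function.comp, h, if_pos]
          exact (eq_of_beq h).symm
        · simp [Function.comp, h]
      rw [hkeys]; exact hnd
    · rw [if_neg hlt]; exact hnd

lemma pv_loop (records : List (List (String × String))) :
    ∀ (L : List (String × List (String × String)))
      (G : List (String × List (List (String × String)))),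
      List.Forall₂ pvRel L G → (L.map Prod.fst).Nodup →
      List.Forall₂ pvRel (records.foldl (fun L r => pvStepA r L) L)
        (records.foldl (fun G r => pvStepB r G) G) := by
  induction records with
  | nil => intro L G h _; exact h
  | cons r rs ih =>
    intro L G h hnd
    exact ih _ _ (pv_rel_step r h hnd) (pv_nodup_stepA r hnd)

lemma pv_out_rel {L : List (String × List (String × String))}
    {G : List (String × List (List (String × String)))}
    (h : List.Forall₂ pvRel L G) :
    (G.map Prod.snd).filterMap (fun g => PySem.List.max? g pvKey) = L.map Prod.snd := by
  induction h with
  | nil => rfl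
  | cons hr _ ih => simp [hr.2, ih]

lemma pv_foldA_items (records : List (List (String × String))) :
    ∀ (d : PySem.Dict String (List (String × String))),
      (records.foldl (fun by_stage r => PySem.Dict.mk (pvStepA r by_stage.items)) d).items =
        records.foldl (fun L r => pvStepA r L) d.items := by
  induction records with
  | nil => intro d; rfl
  | cons r rs ih =>
    intro d
    exact ih (PySem.Dict.mk (pvStepA r d.items))

lemma pv_foldB_items (records : List (List (String × String))) :
    ∀ (g : PySem.Dict String (List (List (String × String)))),
      (records.foldl (fun groups r => PySem.Dict.mk (pvStepB r groups.items)) g).items =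
        records.foldl (fun G r => pvStepB r G) g.items := by
  induction records with
  | nil => intro g; rfl
  | cons r rs ih =>
    intro g
    exact ih (PySem.Dict.mk (pvStepB r g.items))

-- ===== VERDICT (by name: the statement is the Claim_ definition above) =====
theorem dedup_for_duration_py_spec : Claim_equal_dedup_for_duration_py := by
  intro records _
  unfold Spec_dedup_for_duration_py dedup_for_duration_py dedup_for_duration_py_alt
  simp only [pv_bodyA_eq, pv_bodyB_eq, PySem.Dict.values]
  rw [pv_foldA_items, pv_foldB_items]
  exact (pv_out_rel (pv_loop records [] [] List.Forall₂.nil List.nodup_nil)).symm
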